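-- pv_equiv track=rewrite | github.com/radtklau/google_foobar | challenge1.py | solution
-- ===== SOURCE A (Python) =====
-- def solution(i):
--     prime_string = "2"
--     natural_number = 2
--
--     while(len(prime_string) < i+5):
--         prime_number = 0
--         len_prime_string = len(prime_string)
--         while(len_prime_string == len(prime_string)):
--             natural_number += 1
--             for denominator in range(natural_number-1,1,-1):
--                 if(natural_number % denominator == 0):
--                     break
--                 if(denominator == 2):
--                     prime_number = natural_number
--                     prime_string += str(prime_number)
--
--     return prime_string[i:i+5]
-- ===== SOURCE B (Python) =====
-- def _is_prime(n):
--     if n < 2: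
--         return False
--     if n < 4:
--         return True  # 2 and 3
--     if n % 2 == 0:
--         return False
--     d = 3
--     while d * d <= n:
--         if n % d == 0:
--             return False
--         d += 2
--     return True
--
--
-- def solution(i):
--     s = "2"
--     n = 3
--     while len(s) < i + 5:
--         if _is_prime(n):
--             s += str(n)
--         n += 1
--     return s[i:i + 5]
-- ===== Notes on version B (the rewrite author's own statement) =====
-- stated objective: faster
-- what changed: Replaces A's full descending trial-division scan over every candidate divisor inside a doubly-nested while with a single candidate loop using an O(sqrt n) primality helper (evenness check plus odd divisors up to the square root).
import Mathlib
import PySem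

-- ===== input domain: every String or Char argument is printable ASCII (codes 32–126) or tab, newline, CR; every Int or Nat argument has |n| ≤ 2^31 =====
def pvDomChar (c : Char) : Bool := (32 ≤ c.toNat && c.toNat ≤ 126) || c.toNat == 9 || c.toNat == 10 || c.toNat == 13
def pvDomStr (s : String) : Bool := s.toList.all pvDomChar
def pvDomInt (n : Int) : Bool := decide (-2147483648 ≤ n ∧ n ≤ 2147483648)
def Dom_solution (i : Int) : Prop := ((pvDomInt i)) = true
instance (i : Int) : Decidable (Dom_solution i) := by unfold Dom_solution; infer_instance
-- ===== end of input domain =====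

-- B replaces A's full descending trial division (all candidate divisors n-1..2) inside a doubly-nested
-- while by a single candidate loop with an O(√n) primality helper (even check + odd divisors up to √n):
-- objective faster (asymptotically fewer divisions per candidate).
-- The while loops are ported with explicit fuel as a pure totality guard; the fuel amounts are proved
-- sufficient (via Bertrand's postulate) in the lemmas below the claim block.

-- ===== PORT A =====

-- the for-loop 'for denominator in range(natural_number-1,1,-1): if n % d == 0: break; if d == 2: prime'
def trialA (n : Int) : List Int → Bool
  | [] => false
  | d :: ds =>
    if PySem.Int.mod n d == 0 then false
    else if d == 2 then true
    else trialA n ds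

def isPrimeA (n : Int) : Bool := trialA n (PySem.List.pyRange (n - 1) 1 (-1))

-- inner 'while(len_prime_string == len(prime_string))': advance natural_number until A's scan passes
-- (fuel-guarded; never exhausted on the values reached, proved below the claim)
def nextAGo : Nat → Int → Int
  | 0, n => n + 1
  | f + 1, n => if isPrimeA (n + 1) then n + 1 else nextAGo f (n + 1)

def nextA (n : Int) : Int := nextAGo (n.toNat + 2) n

-- outer 'while(len(prime_string) < i+5)': each pass appends the next prime's digits
def buildAGo (i : Int) : Nat → List Char → Int → List Char
  | 0, cs, _ => cs
  | f + 1, cs, n =>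
    if (cs.length : Int) < i + 5 then
      buildAGo i f (cs ++ PySem.Int.toChars (nextA n)) (nextA n)
    else cs

def solution (i : Int) : String :=
  String.ofList (PySem.Chars.slice (buildAGo i (i + 5).toNat ['2'] 2) (some i) (some (i + 5)))

-- ===== PORT B =====

-- the 'while d * d <= n' loop of _is_prime (fuel-guarded; fuel n.toNat is sufficient, proved below)
def isPrimeLoopB : Nat → Int → Int → Bool
  | 0, _, _ => true
  | f + 1, n, d =>
    if d * d ≤ n then
      if PySem.Int.mod n d == 0 then false else isPrimeLoopB f n (d + 2)
    else true

-- _is_prime(n)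
def isPrimeB (n : Int) : Bool :=
  if n < 2 then false
  else if n < 4 then true
  else if PySem.Int.mod n 2 == 0 then false
  else isPrimeLoopB n.toNat n 3

-- 'while len(s) < i + 5: if _is_prime(n): s += str(n); n += 1'
-- (fuel-guarded; fuel 2^(i+5).toNat is sufficient by Bertrand's postulate, proved below)
def buildBGo (i : Int) : Nat → List Char → Int → List Char
  | 0, cs, _ => cs
  | f + 1, cs, n =>
    if (cs.length : Int) < i + 5 then
      buildBGo i f (if isPrimeB n then cs ++ PySem.Int.toChars n else cs) (n + 1)
    else cs

def solution_alt (i : Int) : String :=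
  String.ofList (PySem.Chars.slice (buildBGo i (2 ^ (i + 5).toNat) ['2'] 3) (some i) (some (i + 5)))

-- ===== PRECONDITION & SPEC =====
def Spec_solution (i : Int) (out : String) : Prop := out = solution_alt i
instance (i : Int) (out : String) : Decidable (Spec_solution i out) := by unfold Spec_solution; infer_instance

-- ===== CLAIM (what is proved, stated in full; the proofs are below) =====
def Claim_equal_solution : Prop := ∀ (i : Int), Dom_solution i → Spec_solution i (solution i)

-- ===== LEMMAS AND PROOFS =====

-- characterisation of A's descending trial-division scan
theorem trialA_iff (n : Int) (k : Nat) :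
    trialA n (PySem.List.pyRange ((k : Int) + 2) 1 (-1)) = true ↔
      ∀ d : Int, 2 ≤ d → d ≤ (k : Int) + 2 → ¬ d ∣ n := by
  induction k with
  | zero =>
    rw [show ((0 : Nat) : Int) + 2 = 2 by norm_num,
        PySem.List.pyRange_neg_one_cons (by omega : (1:Int) < 2),
        PySem.List.pyRange_neg_one_eq_nil (by omega : (2:Int) - 1 ≤ 1)]
    simp only [trialA, beq_iff_eq]
    constructor
    · intro h d hd2 hd2'
      have hd : d = 2 := by omega
      intro hdvd
      have hm : PySem.Int.mod n 2 = 0 :=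
        (PySem.Int.mod_eq_zero_iff_dvd n 2).mpr (hd ▸ hdvd)
      rw [if_pos hm] at h
      exact absurd h (by simp)
    · intro h
      have hnd := h 2 (by omega) (by omega)
      have hm : ¬ PySem.Int.mod n 2 = 0 := by
        rw [PySem.Int.mod_eq_zero_iff_dvd]; exact hnd
      rw [if_neg hm]
      simp
  | succ k ih =>
    have harg : (k : Int) + 3 - 1 = (k : Int) + 2 := by ring
    have hcons : PySem.List.pyRange ((k : Int) + 3) 1 (-1)
        = ((k : Int) + 3) :: PySem.List.pyRange ((k : Int) + 2) 1 (-1) := by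
      rw [PySem.List.pyRange_neg_one_cons (by omega), harg]
    push_cast
    rw [show (k : Int) + 1 + 2 = (k : Int) + 3 by ring, hcons]
    simp only [trialA, beq_iff_eq]
    constructor
    · intro h d hd2 hd3
      by_cases hmod : PySem.Int.mod n ((k : Int) + 3) = 0
      · simp [hmod] at h
      · simp only [hmod, if_false] at h
        have hne2 : ¬ ((k : Int) + 3 = 2) := by omega
        simp only [hne2, if_false] at h
        rcases eq_or_lt_of_le hd3 with heq | hlt
        · intro hdvd
          exact hmod ((PySem.Int.mod_eq_zero_iff_dvd n _).mpr (heq ▸ hdvd))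
        · exact (ih.mp h) d hd2 (by omega)
    · intro h
      have hk3 : ¬ ((k : Int) + 3) ∣ n := h _ (by omega) (le_refl _)
      have hmod : ¬ PySem.Int.mod n ((k : Int) + 3) = 0 := by
        rw [PySem.Int.mod_eq_zero_iff_dvd]; exact hk3
      simp only [hmod, if_false]
      have hne2 : ¬ ((k : Int) + 3 = 2) := by omega
      simp only [hne2, if_false]
      exact ih.mpr (fun d hd2 hd2' => h d hd2 (by omega))

-- A's scan decides primality for n ≥ 3
theorem isPrimeA_iff_prime (n : Int) (h3 : 3 ≤ n) :
    isPrimeA n = true ↔ Nat.Prime n.toNat := by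
  have hn : n = ((n.toNat : Int)) := by omega
  have hk : n - 1 = ((n - 3).toNat : Int) + 2 := by omega
  unfold isPrimeA
  rw [hk, trialA_iff n (n - 3).toNat, ← hk]
  constructor
  · intro h
    rw [Nat.prime_def_lt]
    refine ⟨by omega, fun m hm hdvd => ?_⟩
    by_contra hne
    have hm0 : m ≠ 0 := by
      rintro rfl
      have : n.toNat = 0 := Nat.eq_zero_of_zero_dvd hdvd
      omega
    have hm2 : 2 ≤ m := by omega
    have hdvdZ : (m : Int) ∣ n := by
      rw [hn]; exact_mod_cast hdvd
    exact h (m : Int) (by exact_mod_cast hm2) (by omega) hdvdZ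
  · intro hp d hd2 hdle hdvd
    have hdN : (d.toNat : Int) = d := by omega
    have hdvdN : d.toNat ∣ n.toNat := by
      have : ((d.toNat : Int)) ∣ ((n.toNat : Int)) := by rw [hdN, ← hn]; exact hdvd
      exact_mod_cast this
    rcases (Nat.Prime.eq_one_or_self_of_dvd hp _ hdvdN) with h1 | hs
    · omega
    · omega

-- B's divisor loop returns true when no candidate divides (any fuel)
theorem isPrimeLoopB_of (f : Nat) (n d0 : Int)
    (h : ∀ d : Int, d0 ≤ d → d * d ≤ n → ¬ d ∣ n) : isPrimeLoopB f n d0 = true := by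
  induction f generalizing d0 with
  | zero => rfl
  | succ f ih =>
    simp only [isPrimeLoopB]
    split
    · rename_i hle
      have hnd : ¬ d0 ∣ n := h d0 (le_refl _) hle
      have hmod : ¬ PySem.Int.mod n d0 = 0 := by
        rw [PySem.Int.mod_eq_zero_iff_dvd]; exact hnd
      simp only [beq_iff_eq, hmod, if_false]
      exact ih (d0 + 2) (fun d hd => h d (by omega))
    · rfl

-- with sufficient fuel, a true result means no candidate of d0's parity divides
theorem isPrimeLoopB_true_iff (f : Nat) (n d0 : Int) (h3 : 3 ≤ d0)
    (hf : n + 1 ≤ d0 + 2 * (f : Int)) (h : isPrimeLoopB f n d0 = true) :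
    ∀ d : Int, d0 ≤ d → (d - d0) % 2 = 0 → d * d ≤ n → ¬ d ∣ n := by
  induction f generalizing d0 with
  | zero =>
    intro d hd hpar hdsq hdvd
    push_cast at hf
    nlinarith
  | succ f ih =>
    intro d hd hpar hdsq hdvd
    simp only [isPrimeLoopB] at h
    split at h
    · rename_i hle
      split at h
      · exact absurd h (by simp)
      · rename_i hmod
        rcases eq_or_lt_of_le hd with heq | hlt
        · have hd0dvd : d0 ∣ n := by rw [heq]; exact hdvd
          exact hmod (by simp [(PySem.Int.mod_eq_zero_iff_dvd n d0).mpr hd0dvd])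
        · exact ih (d0 + 2) (by omega) (by push_cast at hf ⊢; omega) h d (by omega)
            (by omega) hdsq hdvd
    · rename_i hgt
      nlinarith
  
-- B's test decides primality
theorem isPrimeB_iff_prime (n : Int) : isPrimeB n = true ↔ Nat.Prime n.toNat := by
  unfold isPrimeB
  by_cases h2 : n < 2
  · simp only [h2, if_true]
    constructor
    · intro h; exact absurd h (by simp)
    · intro hp
      have := hp.two_le
      omega
  · simp only [h2, if_false]
    by_cases h4 : n < 4
    · simp only [h4, if_true]
      have : n = 2 ∨ n = 3 := by omega
      rcases this with rfl | rfl <;> simp <;> decide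
    · simp only [h4, if_false]
      by_cases heven : PySem.Int.mod n 2 = 0
      · simp only [beq_iff_eq, heven, if_true]
        constructor
        · intro h; exact absurd h (by simp)
        · intro hp
          rw [PySem.Int.mod_eq_zero_iff_dvd] at heven
          have hdvdN : 2 ∣ n.toNat := by
            have : ((2 : Nat) : Int) ∣ ((n.toNat : Int)) := by
              rw [show ((n.toNat : Int)) = n by omega]; exact_mod_cast heven
            exact_mod_cast this
          rcases Nat.Prime.eq_one_or_self_of_dvd hp 2 hdvdN with h | h <;> omega
      · simp only [beq_iff_eq, heven, if_false]
        constructor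
        · intro h
          rw [Nat.prime_def_le_sqrt]
          refine ⟨by omega, fun m hm2 hmsq => ?_⟩
          rw [Nat.le_sqrt] at hmsq
          intro hdvd
          by_cases hmeven : 2 ∣ m
          · -- an even divisor would make n even
            have h2n : 2 ∣ n.toNat := dvd_trans hmeven hdvd
            apply heven
            rw [PySem.Int.mod_eq_zero_iff_dvd]
            have : ((2 : Nat) : Int) ∣ ((n.toNat : Int)) := by exact_mod_cast h2n
            rwa [show ((n.toNat : Int)) = n by omega] at this
          · have hm3 : 3 ≤ m := by omega
            have hdvdZ : ((m : Int)) ∣ n := by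
              have : ((m : Int)) ∣ ((n.toNat : Int)) := by exact_mod_cast hdvd
              rwa [show ((n.toNat : Int)) = n by omega] at this
            have hpar : (((m : Int)) - 3) % 2 = 0 := by omega
            have hmsqZ : ((m : Int)) * ((m : Int)) ≤ n := by
              have : ((m * m : Nat) : Int) ≤ ((n.toNat : Int)) := by exact_mod_cast hmsq
              push_cast at this
              omega
            exact isPrimeLoopB_true_iff n.toNat n 3 (by omega) (by omega) h (m : Int)
              (by exact_mod_cast hm3) hpar hmsqZ hdvdZ
        · intro hp
          apply isPrimeLoopB_of
          intro d hd3 hdsq hdvd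
          have hd2 : 2 ≤ d.toNat := by omega
          have hdltZ : d < n := by nlinarith
          have hdlt : d.toNat < n.toNat := by omega
          have hdvdN : d.toNat ∣ n.toNat := by
            have : ((d.toNat : Int)) ∣ ((n.toNat : Int)) := by
              rw [show ((d.toNat : Int)) = d by omega, show ((n.toNat : Int)) = n by omega]
              exact hdvd
            exact_mod_cast this
          rcases Nat.Prime.eq_one_or_self_of_dvd hp _ hdvdN with h | h <;> omega

-- str(n) is never the empty string
theorem toChars_ne_nil (n : Int) : PySem.Int.toChars n ≠ [] := by
  have hcore : ∀ (f m : Nat) (l : List Char), l ≠ [] → Nat.toDigitsCore 10 f m l ≠ [] := by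
    intro f
    induction f with
    | zero => intro m l h; simpa [Nat.toDigitsCore] using h
    | succ f ih =>
      intro m l h
      simp only [Nat.toDigitsCore]
      split
      · simp
      · exact ih _ _ (by simp)
  have hdig : ∀ m : Nat, Nat.toDigits 10 m ≠ [] := by
    intro m
    show Nat.toDigitsCore 10 (m + 1) m [] ≠ []
    rw [Nat.toDigitsCore]
    split
    · simp
    · apply hcore; simp
  unfold PySem.Int.toChars
  split
  · simp
  · exact hdig _

-- with sufficient fuel, nextAGo finds exactly the next prime
theorem nextAGo_eq : ∀ (f : Nat) (m p : Int), 2 ≤ m → m < p → (p - m).toNat ≤ f →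
    Nat.Prime p.toNat → (∀ q : Int, m < q → q < p → ¬ Nat.Prime q.toNat) →
    nextAGo f m = p := by
  intro f
  induction f with
  | zero => intro m p _ hmp hf _ _; omega
  | succ f ih =>
    intro m p hm hmp hf hp hgap
    simp only [nextAGo]
    rcases eq_or_lt_of_le (by omega : m + 1 ≤ p) with heq | hlt
    · rw [if_pos]
      · exact heq
      · rw [heq, isPrimeA_iff_prime p (by omega)]
        exact hp
    · rw [if_neg, ih (m + 1) p (by omega) hlt (by omega) hp
        (fun q hq1 hq2 => hgap q (by omega) hq2)]
      rw [isPrimeA_iff_prime (m + 1) (by omega)]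
      exact hgap (m + 1) (by omega) hlt

-- with no primes strictly between m and n, Bertrand bounds n by 2m
theorem gap_le_two_mul (m n : Int) (hm : 2 ≤ m) (_hmn : m < n)
    (hgap : ∀ q : Int, m < q → q < n → ¬ Nat.Prime q.toNat) : n ≤ 2 * m := by
  obtain ⟨p, hp, hlt, hub⟩ := Nat.bertrand m.toNat (by omega)
  by_contra hcon
  have h1 : m < (p : Int) := by omega
  have h2 : (p : Int) < n := by omega
  have := hgap (p : Int) h1 h2
  rw [Int.toNat_natCast] at this
  exact this hp

-- a fuelled outer loop that is already done returns its string for any fuel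
theorem buildAGo_stop (i : Int) (fA : Nat) (cs : List Char) (m : Int)
    (h : ¬ ((cs.length : Int) < i + 5)) : buildAGo i fA cs m = cs := by
  cases fA with
  | zero => rfl
  | succ f => simp only [buildAGo, h, if_false]

-- the two loops build the same string: B's candidate pointer n sits in the prime-free
-- gap above A's last prime m; the fuel invariants are maintained via Bertrand's postulate
theorem build_agree : ∀ (fB : Nat) (fA : Nat) (i : Int) (cs : List Char) (n m : Int),
    2 ≤ m → m < n →
    (∀ q : Int, m < q → q < n → ¬ Nat.Prime q.toNat) →
    ((i + 5 - (cs.length : Int)).toNat ≤ fA) →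
    ((2 : Int) ^ ((i + 5 - (cs.length : Int)).toNat) * m - n + 1 ≤ (fB : Int)) →
    buildBGo i fB cs n = buildAGo i fA cs m := by
  intro fB
  induction fB with
  | zero =>
    intro fA i cs n m hm hmn hgap hfA hfB
    have hstop : ¬ ((cs.length : Int) < i + 5) := by
      intro hcond
      have hk1 : 1 ≤ (i + 5 - (cs.length : Int)).toNat := by omega
      have hn2m : n ≤ 2 * m := gap_le_two_mul m n hm hmn hgap
      have hpow : (2 : Int) ^ 1 ≤ 2 ^ ((i + 5 - (cs.length : Int)).toNat) :=
        pow_le_pow_right₀ (by norm_num) hk1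
      have hmul : (2 : Int) ^ 1 * m ≤ 2 ^ ((i + 5 - (cs.length : Int)).toNat) * m :=
        mul_le_mul_of_nonneg_right hpow (by omega)
      have h2m : (2 : Int) ^ 1 * m = 2 * m := by ring
      push_cast at hfB
      linarith
    rw [buildAGo_stop i fA cs m hstop]
    rfl
  | succ f ih =>
    intro fA i cs n m hm hmn hgap hfA hfB
    by_cases hcond : ((cs.length : Int) < i + 5)
    · have hk1 : 1 ≤ (i + 5 - (cs.length : Int)).toNat := by omega
      obtain ⟨fA', rfl⟩ : ∃ fA', fA = fA' + 1 := by
        cases fA with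
        | zero => omega
        | succ f' => exact ⟨f', rfl⟩
      have hn2m : n ≤ 2 * m := gap_le_two_mul m n hm hmn hgap
      by_cases hB : isPrimeB n = true
      · -- n is the next prime: A advances to it and appends the same digits
        have hp : Nat.Prime n.toNat := (isPrimeB_iff_prime n).mp hB
        have hnext : nextA m = n :=
          nextAGo_eq (m.toNat + 2) m n hm hmn (by omega) hp hgap
        have htc : 1 ≤ (PySem.Int.toChars n).length :=
          List.length_pos_iff.mpr (toChars_ne_nil n)
        simp only [buildBGo, buildAGo]
        rw [if_pos hcond, if_pos hB, if_pos hcond, hnext]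
        have hk' : (i + 5 - ((cs ++ PySem.Int.toChars n).length : Int)).toNat
            ≤ (i + 5 - (cs.length : Int)).toNat - 1 := by
          simp only [List.length_append]
          push_cast
          omega
        refine ih fA' i (cs ++ PySem.Int.toChars n) (n + 1) n (by omega) (by omega)
          (fun q h1 h2 => absurd h1 (by omega)) ?_ ?_
        · simp only [List.length_append]
          push_cast
          omega
        · have hpow : (2 : Int) ^ ((i + 5 - ((cs ++ PySem.Int.toChars n).length : Int)).toNat)
              ≤ 2 ^ ((i + 5 - (cs.length : Int)).toNat - 1) :=
            pow_le_pow_right₀ (by norm_num) hk'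
          have h1 : (2 : Int) ^ ((i + 5 - ((cs ++ PySem.Int.toChars n).length : Int)).toNat) * n
              ≤ 2 ^ ((i + 5 - (cs.length : Int)).toNat - 1) * n :=
            mul_le_mul_of_nonneg_right hpow (by omega)
          have h2 : (2 : Int) ^ ((i + 5 - (cs.length : Int)).toNat - 1) * n
              ≤ 2 ^ ((i + 5 - (cs.length : Int)).toNat - 1) * (2 * m) :=
            mul_le_mul_of_nonneg_left hn2m (pow_nonneg (by norm_num) _)
          have hk0 : (i + 5 - (cs.length : Int)).toNat
              = ((i + 5 - (cs.length : Int)).toNat - 1) + 1 := by omega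
          have h3m : (2 : Int) ^ ((i + 5 - (cs.length : Int)).toNat) * m
              = 2 ^ ((i + 5 - (cs.length : Int)).toNat - 1) * (2 * m) := by
            conv_lhs => rw [hk0]
            ring
          push_cast at hfB ⊢
          linarith
      · have hnp : ¬ Nat.Prime n.toNat := fun hp => hB ((isPrimeB_iff_prime n).mpr hp)
        simp only [buildBGo]
        rw [if_pos hcond, if_neg hB]
        refine ih (fA' + 1) i cs (n + 1) m hm (by omega) (fun q h1 h2 => ?_) hfA ?_
        · rcases lt_or_ge q n with hlt | hge
          · exact hgap q h1 hlt
          · have hq : q = n := by omega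
            subst hq; exact hnp
        · push_cast at hfB ⊢
          omega
    · rw [buildAGo_stop i fA cs m hcond]
      simp only [buildBGo]
      rw [if_neg hcond]

-- the initial fuel 2^(i+5).toNat satisfies the loop invariant
theorem init_fuel (i : Int) :
    (2 : Int) ^ ((i + 5 - ((['2'] : List Char).length : Int)).toNat) * 2 - 3 + 1
      ≤ ((2 ^ (i + 5).toNat : Nat) : Int) := by
  have hpos : (0 : Int) < 2 ^ (i + 5).toNat := pow_pos (by norm_num) _
  have hlen : ((['2'] : List Char).length : Int) = 1 := by simp
  rw [hlen]
  push_cast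
  by_cases hi : i + 4 ≤ 0
  · rw [show (i + 5 - (1 : Int)).toNat = 0 from by omega, pow_zero]
    linarith
  · have he : (i + 5 - (1 : Int)).toNat + 1 = (i + 5).toNat := by omega
    have h2 : (2 : Int) ^ ((i + 5 - (1 : Int)).toNat + 1)
        = 2 ^ ((i + 5 - (1 : Int)).toNat) * 2 := pow_succ 2 _
    rw [he] at h2
    linarith

-- ===== VERDICT (by name: the statement is the Claim_ definition above) =====
theorem solution_spec : Claim_equal_solution := by
  unfold Claim_equal_solution
  intro i _
  unfold Spec_solution solution solution_alt
  have h := build_agree (2 ^ (i + 5).toNat) (i + 5).toNat i ['2'] 3 2 (by omega) (by omega)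
    (fun q h1 h2 => absurd h1 (by omega)) (by simp only [List.length_singleton]; omega)
    (init_fuel i)
  rw [h]
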